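-- pv_equiv track=rewrite | github.com/DMFriends/portfolio | Python/Sequence/count_sequences.py | count_se_diag_seq
-- ===== SOURCE A (Python) =====
-- def count_se_diag_seq(player_id, player_move_locations):
-- 	diag_id = -2
-- 	num_sequences = 0
-- 	while diag_id <= 4:
-- 		length = 0
-- 		if diag_id < 0:
-- 			row = -diag_id
-- 			column = 0
-- 		else:
-- 			row = 0
-- 			column = diag_id
-- 		diag_id += 1
-- 		while row <= 5 and column <= 7:
-- 			if [row, column] in player_move_locations[player_id]:
-- 				length += 1
-- 			else:
-- 				length = 0
--
-- 			if length >= 4: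
-- 				num_sequences += 1
-- 				break
--
-- 			row += 1
-- 			column += 1
--
-- 	return num_sequences
-- ===== SOURCE B (Python) =====
-- def count_se_diag_seq(player_id, player_move_locations):
-- 	moves = player_move_locations[player_id]
-- 	rows_by_key = {}
-- 	for m in moves:
-- 		if len(m) == 2:
-- 			r, c = m
-- 			k = r - c
-- 			if -4 <= k <= 2 and max(k, 0) <= r <= min(5, 7 + k):
-- 				rows_by_key[k] = rows_by_key.get(k, set()) | {r}
-- 	count = 0
-- 	for k in range(2, -5, -1):
-- 		rows = rows_by_key.get(k, set())
-- 		lo, hi = max(k, 0), min(5, 7 + k)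
-- 		if any(all(s + i in rows for i in range(4)) for s in range(lo, hi - 2)):
-- 			count += 1
-- 	return count
-- ===== Notes on version B (the rewrite author's own statement) =====
-- stated objective: alternative
-- what changed: A scans 42 grid cells across 7 SE diagonals, doing one membership scan of the move list per cell with a run-length counter; B makes a single pass over the move list grouping in-bounds moves into per-diagonal row sets, then does a constant-size check per diagonal for four consecutive rows.
import Mathlib
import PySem

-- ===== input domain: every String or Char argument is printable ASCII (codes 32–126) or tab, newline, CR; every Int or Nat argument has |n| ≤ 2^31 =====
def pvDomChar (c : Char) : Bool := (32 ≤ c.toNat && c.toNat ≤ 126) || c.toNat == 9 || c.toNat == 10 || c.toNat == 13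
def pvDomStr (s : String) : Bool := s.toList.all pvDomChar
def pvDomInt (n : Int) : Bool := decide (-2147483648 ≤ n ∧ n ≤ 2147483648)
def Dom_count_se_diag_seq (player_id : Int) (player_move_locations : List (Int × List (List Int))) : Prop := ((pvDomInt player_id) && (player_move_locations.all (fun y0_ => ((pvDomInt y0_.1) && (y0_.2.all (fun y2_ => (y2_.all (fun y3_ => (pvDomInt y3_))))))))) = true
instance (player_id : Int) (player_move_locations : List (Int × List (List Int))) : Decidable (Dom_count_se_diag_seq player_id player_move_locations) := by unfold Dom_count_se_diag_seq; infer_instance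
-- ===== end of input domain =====

-- B replaces A's 42-cell grid scan (each cell one membership scan of the move list) by a single
-- pass over the move list building per-diagonal row sets, then a constant-size run-of-4 check
-- per diagonal (objective: alternative decomposition).

-- ===== PORT A =====
-- A's inner `while row <= 5 and column <= 7` loop; the Nat fuel (6 suffices: row starts ≥ 0 and
-- the guard stops it at row = 5) only makes the recursion structural, the computation is A's
def aInner (moves : List (List Int)) : Nat → Int → Int → Int → Int
  | 0, _, _, _ => 0
  | fuel+1, row, col, length =>
    if row ≤ 5 ∧ col ≤ 7 then
      let length' := if moves.contains [row, col] then length + 1 else 0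
      if 4 ≤ length' then 1
      else aInner moves fuel (row+1) (col+1) length'
    else 0

def count_se_diag_seq (player_id : Int) (player_move_locations : List (Int × List (List Int))) : Int :=
  match (PySem.Dict.mk player_move_locations).get? player_id with
  | none => 0   -- Python raises KeyError here; excluded by Pre_
  | some moves =>
    (PySem.List.pyRange (-2) 5 1).foldl
      (fun num_sequences diag_id =>
        num_sequences +
          aInner moves 6 (if diag_id < 0 then -diag_id else 0)
            (if diag_id < 0 then 0 else diag_id) 0) 0

-- ===== PORT B =====
def bRows (moves : List (List Int)) : PySem.Dict Int (PySem.Set Int) :=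
  moves.foldl (fun d m =>
    match m with
    | [r, c] =>
      let k := r - c
      if -4 ≤ k ∧ k ≤ 2 ∧ max k 0 ≤ r ∧ r ≤ min 5 (7 + k) then
        d.modify k [] (fun s => PySem.Set.union s [r])
      else d
    | _ => d) PySem.Dict.empty

def bHasRun (rows : PySem.Set Int) (lo hi : Int) : Bool :=
  (PySem.List.pyRange lo (hi - 2) 1).any (fun s =>
    (PySem.List.pyRange 0 4 1).all (fun i => PySem.Set.contains rows (s + i)))

def count_se_diag_seq_alt (player_id : Int) (player_move_locations : List (Int × List (List Int))) : Int :=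
  match (PySem.Dict.mk player_move_locations).get? player_id with
  | none => 0   -- Python raises KeyError here; excluded by Pre_
  | some moves =>
    let d := bRows moves
    (PySem.List.pyRange 2 (-5) (-1)).foldl
      (fun count k =>
        if bHasRun (d.getD k []) (max k 0) (min 5 (7 + k)) then count + 1 else count) 0

-- ===== PRECONDITION & SPEC =====
-- Pre_ excludes exactly the inputs where the Python A raises KeyError: player_id not a key of the dict
def Pre_count_se_diag_seq (player_id : Int) (player_move_locations : List (Int × List (List Int))) : Prop :=
  player_id ∈ player_move_locations.map Prod.fst
instance (player_id : Int) (player_move_locations : List (Int × List (List Int))) : Decidable (Pre_count_se_diag_seq player_id player_move_locations) := by unfold Pre_count_se_diag_seq; infer_instance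

def pvWitness_count_se_diag_seq : Int × (List (Int × List (List Int))) :=
  (0, [(0, [[0,0],[1,1],[2,2],[3,3]])])

def Spec_count_se_diag_seq (player_id : Int) (player_move_locations : List (Int × List (List Int))) (out : Int) : Prop := out = count_se_diag_seq_alt player_id player_move_locations
instance (player_id : Int) (player_move_locations : List (Int × List (List Int))) (out : Int) : Decidable (Spec_count_se_diag_seq player_id player_move_locations out) := by unfold Spec_count_se_diag_seq; infer_instance

-- ===== CLAIM (what is proved, stated in full; the proofs are below) =====
def Claim_equal_count_se_diag_seq : Prop := ∀ (player_id : Int) (player_move_locations : List (Int × List (List Int))), Dom_count_se_diag_seq player_id player_move_locations → Pre_count_se_diag_seq player_id player_move_locations → Spec_count_se_diag_seq player_id player_move_locations (count_se_diag_seq player_id player_move_locations)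

-- ===== LEMMAS AND PROOFS =====

-- one step of B's set-building fold
lemma bRows_step (d : PySem.Dict Int (PySem.Set Int)) (m : List Int) (k r : Int) :
    r ∈ ((fun (d : PySem.Dict Int (PySem.Set Int)) (m : List Int) =>
      match m with
      | [r, c] =>
        let k := r - c
        if -4 ≤ k ∧ k ≤ 2 ∧ max k 0 ≤ r ∧ r ≤ min 5 (7 + k) then
          d.modify k [] (fun s => PySem.Set.union s [r])
        else d
      | _ => d) d m).getD k [] ↔
    r ∈ d.getD k [] ∨ ([r, r - k] = m ∧ -4 ≤ k ∧ k ≤ 2 ∧ max k 0 ≤ r ∧ r ≤ min 5 (7 + k)) := by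
  match m with
  | [] => simp
  | [a] => simp
  | a :: b :: c :: t => simp
  | [a, b] =>
    simp only []
    by_cases hc : -4 ≤ a - b ∧ a - b ≤ 2 ∧ max (a-b) 0 ≤ a ∧ a ≤ min 5 (7 + (a-b))
    · rw [if_pos hc, PySem.Dict.getD_modify]
      by_cases hk : k = a - b
      · subst hk
        rw [if_pos rfl, PySem.Set.mem_union]
        have hiff : [r, r - (a - b)] = [a, b] ↔ r = a := by
          simp only [List.cons.injEq, and_true]
          omega
        simp only [hiff, List.mem_singleton]
        constructor
        · rintro (h | rfl)
          · exact Or.inl h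
          · exact Or.inr ⟨rfl, hc⟩
        · rintro (h | ⟨rfl, _⟩)
          · exact Or.inl h
          · exact Or.inr rfl
      · rw [if_neg hk]
        have : ¬ ([r, r - k] = [a, b] ∧ -4 ≤ k ∧ k ≤ 2 ∧ max k 0 ≤ r ∧ r ≤ min 5 (7 + k)) := by
          rintro ⟨heq, _⟩
          simp only [List.cons.injEq, and_true] at heq
          omega
        tauto
    · rw [if_neg hc]
      have : ¬ ([r, r - k] = [a, b] ∧ -4 ≤ k ∧ k ≤ 2 ∧ max k 0 ≤ r ∧ r ≤ min 5 (7 + k)) := by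
        rintro ⟨heq, h1, h2, h3, h4⟩
        simp only [List.cons.injEq, and_true] at heq
        apply hc
        omega
      tauto

-- membership in the per-diagonal row sets B builds
lemma bRows_aux (ms : List (List Int)) (d : PySem.Dict Int (PySem.Set Int)) (k r : Int) :
    r ∈ (ms.foldl (fun d m =>
      match m with
      | [r, c] =>
        let k := r - c
        if -4 ≤ k ∧ k ≤ 2 ∧ max k 0 ≤ r ∧ r ≤ min 5 (7 + k) then
          d.modify k [] (fun s => PySem.Set.union s [r])
        else d
      | _ => d) d).getD k [] ↔
    r ∈ d.getD k [] ∨ ([r, r - k] ∈ ms ∧ -4 ≤ k ∧ k ≤ 2 ∧ max k 0 ≤ r ∧ r ≤ min 5 (7 + k)) := by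
  induction ms generalizing d with
  | nil => simp
  | cons m ms ih =>
    rw [List.foldl_cons, ih, bRows_step d m k r]
    simp only [List.mem_cons]
    tauto

lemma bRows_contains (moves : List (List Int)) (k r : Int)
    (hk1 : -4 ≤ k) (hk2 : k ≤ 2) (hr1 : max k 0 ≤ r) (hr2 : r ≤ min 5 (7 + k)) :
    PySem.Set.contains ((bRows moves).getD k []) r = moves.contains [r, r - k] := by
  rw [Bool.eq_iff_iff, PySem.Set.contains_iff, List.contains_iff_mem]
  unfold bRows
  rw [bRows_aux]
  simp only [PySem.Dict.getD_empty, List.not_mem_nil, false_or]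
  tauto

lemma bHasRun_iff (rows : PySem.Set Int) (lo hi : Int) :
    bHasRun rows lo hi = true ↔
      ∃ s : Int, lo ≤ s ∧ s + 3 ≤ hi ∧
        ∀ i : Int, 0 ≤ i → i ≤ 3 → PySem.Set.contains rows (s + i) = true := by
  unfold bHasRun
  rw [List.any_eq_true]
  constructor
  · rintro ⟨s, hs, hall⟩
    rw [PySem.List.mem_pyRange_one] at hs
    rw [List.all_eq_true] at hall
    exact ⟨s, hs.1, by omega, fun i hi0 hi3 =>
      hall i (by rw [PySem.List.mem_pyRange_one]; omega)⟩
  · rintro ⟨s, h1, h2, h3⟩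
    refine ⟨s, by rw [PySem.List.mem_pyRange_one]; omega, ?_⟩
    rw [List.all_eq_true]
    intro i hi
    rw [PySem.List.mem_pyRange_one] at hi
    exact h3 i hi.1 (by omega)

-- B's run check phrased directly on the move list (proof device for aInner_eq)
def runB (moves : List (List Int)) (k lo hi : Int) : Bool :=
  (PySem.List.pyRange lo (hi - 2) 1).any (fun s =>
    (PySem.List.pyRange 0 4 1).all (fun i => moves.contains [s + i, s + i - k]))

lemma runB_iff (moves : List (List Int)) (k lo hi : Int) :
    runB moves k lo hi = true ↔
      ∃ s : Int, lo ≤ s ∧ s + 3 ≤ hi ∧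
        ∀ i : Int, 0 ≤ i → i ≤ 3 → moves.contains [s + i, s + i - k] = true := by
  unfold runB
  rw [List.any_eq_true]
  constructor
  · rintro ⟨s, hs, hall⟩
    rw [PySem.List.mem_pyRange_one] at hs
    rw [List.all_eq_true] at hall
    exact ⟨s, hs.1, by omega, fun i hi0 hi3 =>
      hall i (by rw [PySem.List.mem_pyRange_one]; omega)⟩
  · rintro ⟨s, h1, h2, h3⟩
    refine ⟨s, by rw [PySem.List.mem_pyRange_one]; omega, ?_⟩
    rw [List.all_eq_true]
    intro i hi
    rw [PySem.List.mem_pyRange_one] at hi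
    exact h3 i hi.1 (by omega)

-- A's inner scan characterised: with `len` rows of credit already matched, it returns 1 exactly
-- when a 4-run of moves on diagonal k starts at some s ≥ row - len and ends at or below min 5 (7+k)
lemma aInner_eq (moves : List (List Int)) (k : Int) (fuel : Nat) (row len : Int)
    (hlen0 : 0 ≤ len) (hlen3 : len ≤ 3)
    (hfuel : min 5 (7 + k) + 1 ≤ row + fuel)
    (hcred : ∀ j : Int, 1 ≤ j → j ≤ len → moves.contains [row - j, row - j - k] = true) :
    aInner moves fuel row (row - k) len =
      if runB moves k (row - len) (min 5 (7 + k)) then 1 else 0 := by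
  induction fuel generalizing row len with
  | zero =>
    simp only [aInner]
    rw [if_neg]
    rw [runB_iff]
    rintro ⟨s, h1, h2, -⟩
    omega
  | succ fuel ih =>
    simp only [aInner]
    by_cases hg : row ≤ 5 ∧ row - k ≤ 7
    · rw [if_pos hg]
      by_cases hh : moves.contains [row, row - k] = true
      · rw [if_pos hh]
        by_cases h4 : (4:Int) ≤ len + 1
        · rw [if_pos h4, if_pos]
          rw [runB_iff]
          refine ⟨row - 3, by omega, by omega, ?_⟩
          intro i hi0 hi3
          by_cases h3 : i = 3
          · subst h3
            have he : row - 3 + 3 = row := by omega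
            rw [he]; exact hh
          · have hc := hcred (3 - i) (by omega) (by omega)
            have he : row - 3 + i = row - (3 - i) := by omega
            rw [he]; exact hc
        · rw [if_neg h4]
          have hcred' : ∀ j : Int, 1 ≤ j → j ≤ len + 1 →
              moves.contains [row + 1 - j, row + 1 - j - k] = true := by
            intro j hj1 hj2
            by_cases hj : j = 1
            · subst hj
              have he : row + 1 - 1 = row := by omega
              rw [he]; exact hh
            · have hc := hcred (j - 1) (by omega) (by omega)
              have he : row + 1 - j = row - (j - 1) := by omega
              rw [he]; exact hc
          have hcol : row - k + 1 = (row + 1) - k := by omega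
          rw [hcol, ih (row + 1) (len + 1) (by omega) (by omega) (by omega) hcred']
          have he : row + 1 - (len + 1) = row - len := by omega
          rw [he]
      · rw [if_neg hh]
        rw [if_neg (by omega : ¬ (4:Int) ≤ 0)]
        have hcol : row - k + 1 = (row + 1) - k := by omega
        rw [hcol, ih (row + 1) 0 le_rfl (by omega) (by omega) (by omega)]
        have hbe : runB moves k (row + 1 - 0) (min 5 (7 + k)) =
            runB moves k (row - len) (min 5 (7 + k)) := by
          rw [Bool.eq_iff_iff, runB_iff, runB_iff]
          constructor
          · rintro ⟨s, h1, h2, hall⟩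
            exact ⟨s, by omega, h2, hall⟩
          · rintro ⟨s, h1, h2, hall⟩
            have hs' : row + 1 ≤ s := by
              by_contra hlt
              have := hall (row - s) (by omega) (by omega)
              have he : s + (row - s) = row := by omega
              rw [he] at this
              exact hh this
            exact ⟨s, by omega, h2, hall⟩
        rw [hbe]
    · rw [if_neg hg, if_neg]
      rw [runB_iff]
      rintro ⟨s, h1, h2, -⟩
      omega

-- one diagonal: A's scan from its anchor agrees with B's set-based run check
lemma key_step (moves : List (List Int)) (k : Int) (hk1 : -4 ≤ k) (hk2 : k ≤ 2) :
    aInner moves 6 (max k 0) (max k 0 - k) 0 =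
      if bHasRun ((bRows moves).getD k []) (max k 0) (min 5 (7 + k)) then 1 else 0 := by
  rw [aInner_eq moves k 6 (max k 0) 0 le_rfl (by omega) (by omega)
    (by intro j hj1 hj2; exact absurd hj2 (by omega))]
  have he : max k 0 - 0 = max k 0 := by omega
  rw [he]
  have hbe : bHasRun ((bRows moves).getD k []) (max k 0) (min 5 (7 + k)) =
      runB moves k (max k 0) (min 5 (7 + k)) := by
    rw [Bool.eq_iff_iff, bHasRun_iff, runB_iff]
    constructor
    · rintro ⟨s, h1, h2, hall⟩
      refine ⟨s, h1, h2, fun i hi0 hi3 => ?_⟩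
      have hc := hall i hi0 hi3
      rwa [bRows_contains moves k (s+i) hk1 hk2 (by omega) (by omega)] at hc
    · rintro ⟨s, h1, h2, hall⟩
      refine ⟨s, h1, h2, fun i hi0 hi3 => ?_⟩
      have hc := hall i hi0 hi3
      rwa [bRows_contains moves k (s+i) hk1 hk2 (by omega) (by omega)]
  rw [hbe]

-- both folds, aligned term by term via k = -diag_id
lemma fold_step (moves : List (List Int)) (ds : List Int) (acc : Int)
    (h : ∀ d ∈ ds, -2 ≤ d ∧ d ≤ 4) :
    ds.foldl (fun num_sequences diag_id =>
        num_sequences +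
          aInner moves 6 (if diag_id < 0 then -diag_id else 0)
            (if diag_id < 0 then 0 else diag_id) 0) acc =
    (ds.map (fun d => -d)).foldl (fun count k =>
        if bHasRun ((bRows moves).getD k []) (max k 0) (min 5 (7 + k)) then count + 1
        else count) acc := by
  induction ds generalizing acc with
  | nil => rfl
  | cons d ds ih =>
    rw [List.map_cons, List.foldl_cons, List.foldl_cons,
      ih _ (fun x hx => h x (List.mem_cons_of_mem d hx))]
    congr 1
    have hd := h d List.mem_cons_self
    have h1 : (if d < 0 then -d else 0) = max (-d) 0 := by
      rcases lt_or_ge d 0 with hlt | hge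
      · rw [if_pos hlt]; omega
      · rw [if_neg (by omega)]; omega
    have h2 : (if d < 0 then 0 else d) = max (-d) 0 - (-d) := by
      rcases lt_or_ge d 0 with hlt | hge
      · rw [if_pos hlt]; omega
      · rw [if_neg (by omega)]; omega
    rw [h1, h2, key_step moves (-d) (by omega) (by omega)]
    cases hb : bHasRun ((bRows moves).getD (-d) []) (max (-d) 0) (min 5 (7 + -d)) with
    | false => simp
    | true => simp

-- ===== VERDICT (by name: the statement is the Claim_ definition above) =====
theorem count_se_diag_seq_spec : Claim_equal_count_se_diag_seq := by
  intro player_id player_move_locations _hdom hpre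
  unfold Spec_count_se_diag_seq
  cases hget : (PySem.Dict.mk player_move_locations).get? player_id with
  | none =>
    exfalso
    rw [PySem.Dict.get?_eq_none_iff_not_mem_keys] at hget
    apply hget
    rw [PySem.Dict.keys_mk]
    exact hpre
  | some moves =>
    simp only [count_se_diag_seq, count_se_diag_seq_alt, hget]
    rw [show (PySem.List.pyRange 2 (-5) (-1)) =
        (PySem.List.pyRange (-2) 5 1).map (fun d => -d) from by decide]
    exact fold_step moves _ 0
      (by intro d hd; rw [PySem.List.mem_pyRange_one] at hd; omega)
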